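-- pv_equiv track=rewrite | github.com/mmshihov/informatics | lections/presentation/08-div/py/division-model-wvo.py | Divide2
-- ===== SOURCE A (Python) =====
-- N = 8
--
-- def Divide2(dividend, divider):
--     dividend    = dividend & ((1 << N) - 1)
--     divider     = divider  & ((1 << N) - 1)
--     divider     = divider << N
--
--     quotent     = 0;
--     reminder    = dividend
--     i           = 0
--
--     oldReminder = reminder
--     while (i < N):
--         i = i + 1
--
--         quotent  = (quotent << 1)
--         divider  = (divider >> 1)
--
--         if (oldReminder < 0):
--             reminder = reminder + divider
--         else:
--             reminder = reminder - divider
--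
--         if (reminder >= 0):
--             quotent = (quotent | 1)
--
--         oldReminder = reminder
--
--     if (reminder < 0):
--         reminder = reminder + divider
--
--     return (quotent, reminder)
-- ===== SOURCE B (Python) =====
-- def Divide2(dividend, divider):
--     return divmod(dividend & 255, divider & 255)
-- ===== Notes on version B (the rewrite author's own statement) =====
-- stated objective: simpler
-- what changed: Replaces the 8-iteration non-restoring bit-serial division loop (shifting a widened divisor and maintaining a signed partial remainder) by a single divmod on the two 8-bit-masked arguments.
-- outside the precondition, e.g. on Divide2(5, 0): A returns (255, 5), B raises ZeroDivisionError; on Divide2(7, 256): A returns (255, 7), B raises ZeroDivisionError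
import Mathlib
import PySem

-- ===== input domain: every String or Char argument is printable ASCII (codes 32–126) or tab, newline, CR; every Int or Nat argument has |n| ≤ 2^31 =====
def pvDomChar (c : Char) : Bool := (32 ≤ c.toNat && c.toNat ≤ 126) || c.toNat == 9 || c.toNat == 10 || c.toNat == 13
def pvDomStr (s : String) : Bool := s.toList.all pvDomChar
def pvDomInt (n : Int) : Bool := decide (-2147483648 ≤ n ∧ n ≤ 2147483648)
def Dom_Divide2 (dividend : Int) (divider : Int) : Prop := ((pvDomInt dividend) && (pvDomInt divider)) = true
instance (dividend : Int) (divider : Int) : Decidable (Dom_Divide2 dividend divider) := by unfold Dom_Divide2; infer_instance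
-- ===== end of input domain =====

-- B replaces A's 8-iteration non-restoring bit-serial division loop by a single divmod on the
-- masked arguments (simpler); where the masked divisor is 0, A returns a loop artifact and B raises,
-- so Pre_ excludes those inputs.

-- ===== PORT A =====
-- the while loop of A; state (quotent, divider, reminder, oldReminder), fuel = N - i (N = 8)
def divide2Loop (fuel : Nat) (quotent divider reminder oldReminder : Int) : Int × Int × Int :=
  match fuel with
  | 0 => (quotent, divider, reminder)
  | n + 1 =>
    let quotent' := quotent <<< (1:Nat)
    let divider' := divider >>> (1:Nat)
    let reminder' := if oldReminder < 0 then reminder + divider' else reminder - divider'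
    let quotent'' := if reminder' ≥ 0 then PySem.Int.bor quotent' 1 else quotent'
    divide2Loop n quotent'' divider' reminder' reminder'

def Divide2 (dividend : Int) (divider : Int) : Int × Int :=
  let dividend := PySem.Int.band dividend (((1:Int) <<< (8:Nat)) - 1)   -- N = 8
  let divider := PySem.Int.band divider (((1:Int) <<< (8:Nat)) - 1)
  let divider := divider <<< (8:Nat)
  let (quotent, divider, reminder) := divide2Loop 8 0 divider dividend dividend
  if reminder < 0 then (quotent, reminder + divider) else (quotent, reminder)

-- ===== PORT B =====
def Divide2_alt (dividend : Int) (divider : Int) : Int × Int :=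
  -- divmod(dividend & 255, divider & 255); getD only totalises the zero-divisor case excluded by Pre_
  (PySem.Int.divmod? (PySem.Int.band dividend 255) (PySem.Int.band divider 255)).getD (0, 0)

-- ===== PRECONDITION & SPEC =====
-- Pre_ excludes masked-divisor-zero inputs, on which A's returned (255, dividend & 255) is an
-- artifact of the non-restoring loop and B's divmod raises ZeroDivisionError.
def Pre_Divide2 (dividend : Int) (divider : Int) : Prop := PySem.Int.band divider 255 ≠ 0
instance (dividend : Int) (divider : Int) : Decidable (Pre_Divide2 dividend divider) := by unfold Pre_Divide2; infer_instance
def pvWitness_Divide2 : Int × Int := (200, 7)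
def Spec_Divide2 (dividend : Int) (divider : Int) (out : Int × Int) : Prop := out = Divide2_alt dividend divider
instance (dividend : Int) (divider : Int) (out : Int × Int) : Decidable (Spec_Divide2 dividend divider out) := by unfold Spec_Divide2; infer_instance

-- ===== CLAIM =====
def Claim_equal_Divide2 : Prop := ∀ (dividend : Int) (divider : Int), Dom_Divide2 dividend divider → Pre_Divide2 dividend divider → Spec_Divide2 dividend divider (Divide2 dividend divider)

-- ===== LEMMAS AND PROOFS =====

-- Python's a & 255 is a mod 256, for every integer a (including negatives)
lemma band255 (a : Int) : PySem.Int.band a 255 = a % 256 := by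
  have h1 : a.toNat &&& 255 = a.toNat % 256 := by
    simpa using Nat.and_two_pow_sub_one_eq_mod a.toNat 8
  have h2 : 255 &&& (-a-1).toNat = (-a-1).toNat % 256 := by
    rw [Nat.and_comm]; simpa using Nat.and_two_pow_sub_one_eq_mod (-a-1).toNat 8
  unfold PySem.Int.band
  simp only [show Int.toNat 255 = 255 from rfl]
  split_ifs <;> omega

-- (2q) | 1 = 2q + 1 for q ≥ 0
lemma bor1 (q : Int) (hq : 0 ≤ q) : PySem.Int.bor (2*q) 1 = 2*q+1 := by
  rw [PySem.Int.bor_of_nonneg (by omega) (by omega)]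
  have h : q.toNat * 2 ||| 1 = q.toNat * 2 + 1 := by
    simpa [Nat.shiftLeft_eq] using
      (Nat.shiftLeft_add_eq_or_of_lt (i := 1) (b := 1) (by decide) q.toNat).symm
  have ht : (2*q).toNat = q.toNat * 2 := by omega
  have ht1 : (1:Int).toNat = 1 := rfl
  rw [ht, ht1, h]; push_cast; omega

-- non-restoring division invariant: entering the loop with divider y·2^fuel, quotient q ≥ 0,
-- partial remainder r with -y·2^fuel ≤ r < y·2^fuel and
-- x = q·(y·2^fuel) + r (r ≥ 0)  or  x = (q+1)·(y·2^fuel) + r (r < 0),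
-- the loop ends at divider y and quotient x/y, with remainder x%y or x%y - y.
lemma loop_correct (fuel : Nat) : ∀ (q r x y : Int), 0 < y → 0 ≤ q →
    -(y * 2^fuel) ≤ r → r < y * 2^fuel →
    ((0 ≤ r ∧ x = q * (y * 2^fuel) + r) ∨ (r < 0 ∧ x = (q+1) * (y * 2^fuel) + r)) →
    divide2Loop fuel q (y * 2^fuel) r r = (x / y, y, x % y) ∨
    divide2Loop fuel q (y * 2^fuel) r r = (x / y, y, x % y - y) := by
  induction fuel with
  | zero =>
    intro q r x y hy hq hlo hhi hval
    simp only [pow_zero, mul_one] at hlo hhi hval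
    simp only [divide2Loop, pow_zero, mul_one]
    rcases hval with ⟨hr, hx⟩ | ⟨hr, hx⟩
    · obtain ⟨h1, h2⟩ := (Int.ediv_emod_unique (a := x) (b := y) (r := r) (q := q) hy).mpr
        ⟨by linarith, hr, hhi⟩
      left; rw [h1, h2]
    · obtain ⟨h1, h2⟩ := (Int.ediv_emod_unique (a := x) (b := y) (r := r + y) (q := q) hy).mpr
        ⟨by linarith, by omega, by omega⟩
      right; rw [h1, h2]; simp
  | succ n ih =>
    intro q r x y hy hq hlo hhi hval
    have hpow : y * 2^(n+1) = 2*(y*2^n) := by ring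
    have hsr : (y * 2^(n+1)) >>> (1:Nat) = y * 2^n := by
      have h : y * 2^(n+1) = (y*2^n) * 2 := by ring
      rw [h, Int.shiftRight_eq_div_pow]
      push_cast
      exact Int.mul_ediv_cancel _ (by norm_num)
    have hql : q <<< (1:Nat) = 2*q := by rw [Int.shiftLeft_eq]; ring
    rw [hpow] at hlo hhi hval
    simp only [divide2Loop, hsr, hql]
    rcases hval with ⟨hr, hx⟩ | ⟨hr, hx⟩
    · rw [if_neg (by omega : ¬ r < 0)]
      by_cases hr' : r - y*2^n ≥ 0
      · rw [if_pos hr', bor1 q hq]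
        exact ih (2*q+1) (r - y*2^n) x y hy (by omega) (by omega) (by omega)
          (Or.inl ⟨hr', by linear_combination hx⟩)
      · rw [if_neg hr']
        exact ih (2*q) (r - y*2^n) x y hy (by omega) (by omega) (by omega)
          (Or.inr ⟨by omega, by linear_combination hx⟩)
    · rw [if_pos hr]
      by_cases hr' : r + y*2^n ≥ 0
      · rw [if_pos hr', bor1 q hq]
        exact ih (2*q+1) (r + y*2^n) x y hy (by omega) (by omega) (by omega)
          (Or.inl ⟨hr', by linear_combination hx⟩)
      · rw [if_neg hr']
        exact ih (2*q) (r + y*2^n) x y hy (by omega) (by omega) (by omega)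
          (Or.inr ⟨by omega, by linear_combination hx⟩)

-- ===== VERDICT =====
theorem Divide2_spec : Claim_equal_Divide2 := by
  intro dividend divider _ hpre
  show Divide2 dividend divider = Divide2_alt dividend divider
  have e255 : ((1:Int) <<< (8:Nat)) - 1 = 255 := by decide
  have hy0 : divider % 256 ≠ 0 := by
    intro h; exact hpre (by rw [band255, h])
  have hy : 0 < divider % 256 := by
    have := Int.emod_nonneg divider (show (256:Int) ≠ 0 by norm_num); omega
  have hx0 : 0 ≤ dividend % 256 :=
    Int.emod_nonneg dividend (show (256:Int) ≠ 0 by norm_num)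
  have hx1 : dividend % 256 < 256 := Int.emod_lt_of_pos dividend (by norm_num)
  have hy1 : divider % 256 < 256 := Int.emod_lt_of_pos divider (by norm_num)
  have h256 : (2:Int)^8 = 256 := by norm_num
  have hsl : (divider % 256) <<< (8:Nat) = divider % 256 * 2^8 := Int.shiftLeft_eq _ 8
  have hloop := loop_correct 8 0 (dividend % 256) (dividend % 256) (divider % 256)
    hy (le_refl 0)
    (by rw [h256]; omega) (by rw [h256]; omega)
    (Or.inl ⟨hx0, by ring⟩)
  have hr0 : 0 ≤ dividend % 256 % (divider % 256) := Int.emod_nonneg _ hy0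
  have hr1 : dividend % 256 % (divider % 256) < divider % 256 := Int.emod_lt_of_pos _ hy
  have hb : Divide2_alt dividend divider =
      (dividend % 256 / (divider % 256), dividend % 256 % (divider % 256)) := by
    simp only [Divide2_alt, band255, PySem.Int.divmod?, if_neg hy0, Option.getD_some]
    rw [Int.fdiv_eq_ediv, Int.fmod_eq_emod]
    simp [Or.inl hy.le]
  rcases hloop with h | h
  · simp only [Divide2, e255, band255, hsl, h]
    rw [hb, if_neg (by omega)]
  · simp only [Divide2, e255, band255, hsl, h]
    rw [hb, if_pos (by omega)]
    norm_num
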